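-- pv_equiv track=rewrite | github.com/jackd71-ops/syndrome-open-claw | data/stic/stic_scraper.py | batch_ranges
-- ===== SOURCE A (Python) =====
-- def batch_ranges(total: int) -> list[tuple[int, int]]:
--     """Split total products into 3 roughly equal ranges."""
--     size = total // 3
--     remainder = total % 3
--     ranges = []
--     start = 1
--     for i in range(3):
--         extra = 1 if i < remainder else 0
--         end = start + size + extra - 1
--         ranges.append((start, end))
--         start = end + 1
--     return ranges
-- ===== SOURCE B (Python) =====
-- def batch_ranges(total: int) -> list[tuple[int, int]]:
--     """Split total products into 3 roughly equal ranges."""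
--     size, rem = divmod(total, 3)
--     return [(1 + i * size + min(i, rem), (i + 1) * size + min(i + 1, rem))
--             for i in range(3)]
-- ===== Notes on version B (the rewrite author's own statement) =====
-- stated objective: simpler
-- what changed: Replaced the sequential loop threading a running start accumulator with a comprehension computing each range in closed form from its index i via i*size + min(i, remainder).
import Mathlib
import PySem

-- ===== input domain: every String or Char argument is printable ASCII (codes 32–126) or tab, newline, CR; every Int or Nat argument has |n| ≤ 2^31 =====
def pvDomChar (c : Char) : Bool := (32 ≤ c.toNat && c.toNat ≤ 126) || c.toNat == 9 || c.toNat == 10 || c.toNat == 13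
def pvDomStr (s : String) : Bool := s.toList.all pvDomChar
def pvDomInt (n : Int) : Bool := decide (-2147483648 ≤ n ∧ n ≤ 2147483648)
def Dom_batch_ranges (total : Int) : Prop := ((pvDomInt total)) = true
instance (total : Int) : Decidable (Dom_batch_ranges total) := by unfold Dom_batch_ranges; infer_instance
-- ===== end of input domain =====

-- B computes each range in closed form from its index instead of threading a running start. Objective: simpler.
-- ===== PORT A =====
def batch_ranges (total : Int) : List (Int × Int) :=
  let size := PySem.Int.floordiv total 3
  let remainder := PySem.Int.mod total 3
  let st := (PySem.List.pyRange 0 3 1).foldl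
    (fun (acc : List (Int × Int) × Int) i =>
      let extra : Int := if i < remainder then 1 else 0
      let «end» := acc.2 + size + extra - 1
      (acc.1 ++ [(acc.2, «end»)], «end» + 1))
    ([], 1)
  st.1

-- ===== PORT B =====
def batch_ranges_alt (total : Int) : List (Int × Int) :=
  let size := PySem.Int.floordiv total 3
  let rem := PySem.Int.mod total 3
  (PySem.List.pyRange 0 3 1).map
    (fun i => (1 + i * size + min i rem, (i + 1) * size + min (i + 1) rem))

-- ===== PRECONDITION & SPEC =====
def Spec_batch_ranges (total : Int) (out : List (Int × Int)) : Prop := out = batch_ranges_alt total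
instance (total : Int) (out : List (Int × Int)) : Decidable (Spec_batch_ranges total out) := by unfold Spec_batch_ranges; infer_instance

-- ===== CLAIM (what is proved, stated in full; the proofs are below) =====
def Claim_equal_batch_ranges : Prop := ∀ (total : Int), Dom_batch_ranges total → Spec_batch_ranges total (batch_ranges total)

-- ===== LEMMAS AND PROOFS =====

-- ===== VERDICT (by name: the statement is the Claim_ definition above) =====
theorem batch_ranges_spec : Claim_equal_batch_ranges := by
  intro total _
  unfold Spec_batch_ranges batch_ranges batch_ranges_alt
  simp [PySem.List.pyRange, List.range_succ, Prod.ext_iff, min_def]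
  refine ⟨⟨?_, ?_⟩, ⟨?_, ?_⟩, ?_, ?_⟩ <;> first | omega | (split_ifs <;> omega)
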